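-- pv_equiv track=rewrite | github.com/HephyAnalysisSW/CorrelatorMtop | Tools/python/objectSelection.py | electronVIDSelector
-- ===== SOURCE A (Python) =====
-- import  textwrap     # for CutBased Ele ID
--
-- vidNestedWPBitMapNamingList = \
--     ['GsfEleMissingHitsCut',
--      'GsfEleConversionVetoCut',
--      'GsfEleRelPFIsoScaledCut',
--      'GsfEleEInverseMinusPInverseCut',
--      'GsfEleHadronicOverEMEnergyScaledCut',
--      'GsfEleFull5x5SigmaIEtaIEtaCut',
--      'GsfEleDPhiInCut',
--      'GsfEleDEtaInSeedCut',
--      'GsfEleSCEtaMultiRangeCut',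
--      'MinPtCut']
--
-- def vidNestedWPBitMapToDict( val ):
--     # convert int of vidNestedWPBitMap ( e.g. val = 611099940 ) to bitmap ( e.g. "100100011011001010010100100100")
--     # split vidBitmap string (containing 3 bits per cut) in parts of 3 bits ( e.g. ["100","100","011","011","001","010","010","100","100","100"] )
--     # convert 3 bits to int ( e.g. [4, 4, 3, 3, 1, 2, 2, 4, 4, 4])
--     # create dictionary
--     idList = [ int( x, 2 ) for x in textwrap.wrap( "{0:030b}".format( val ) , 3) ] #use 2 for nanoAOD version 80x
--     return dict( zip( vidNestedWPBitMapNamingList, idList ) )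
--
-- def removekey(d, key):
--     r = dict(d)
--     del r[key]
--     return r
--
-- def electronVIDSelector( l, idVal, removedCuts=[] ):
--
--     vidDict    = vidNestedWPBitMapToDict( l['vidNestedWPBitmap'] )
--     if not removedCuts:
--         return all( [ cut >= idVal for cut in vidDict.values() ] )
--
--     if ("pt"             in removedCuts):
--         vidDict = removekey( vidDict, "MinPtCut" )
--     if ("sieie"          in removedCuts):
--         vidDict = removekey( vidDict, "GsfEleFull5x5SigmaIEtaIEtaCut" )
--     if ("hoe"            in removedCuts):
--         vidDict = removekey( vidDict, "GsfEleHadronicOverEMEnergyScaledCut" )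
--     if ("pfRelIso03_all" in removedCuts):
--         vidDict = removekey( vidDict, "GsfEleRelPFIsoScaledCut" )
--     if ("SCEta" in removedCuts):
--         vidDict = removekey( vidDict, "GsfEleSCEtaMultiRangeCut" )
--     if ("dEtaSeed" in removedCuts):
--         vidDict = removekey( vidDict, "GsfEleDEtaInSeedCut" )
--     if ("dPhiInCut" in removedCuts):
--         vidDict = removekey( vidDict, "GsfEleDPhiInCut" )
--     if ("EinvMinusPinv" in removedCuts):
--         vidDict = removekey( vidDict, "GsfEleEInverseMinusPInverseCut" )
--     if ("convVeto" in removedCuts):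
--         vidDict = removekey( vidDict, "GsfEleConversionVetoCut" )
--     if ("lostHits" in removedCuts):
--         vidDict = removekey( vidDict, "GsfEleMissingHitsCut" )
--
--     return all( [ cut >= idVal for cut in vidDict.values() ] )
-- ===== SOURCE B (Python) =====
-- import textwrap
--
-- vidNestedWPBitMapNamingList = \
--     ['GsfEleMissingHitsCut',
--      'GsfEleConversionVetoCut',
--      'GsfEleRelPFIsoScaledCut',
--      'GsfEleEInverseMinusPInverseCut',
--      'GsfEleHadronicOverEMEnergyScaledCut',
--      'GsfEleFull5x5SigmaIEtaIEtaCut',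
--      'GsfEleDPhiInCut',
--      'GsfEleDEtaInSeedCut',
--      'GsfEleSCEtaMultiRangeCut',
--      'MinPtCut']
--
-- def vidNestedWPBitMapToDict( val ):
--     idList = [ int( x, 2 ) for x in textwrap.wrap( "{0:030b}".format( val ) , 3) ]
--     return dict( zip( vidNestedWPBitMapNamingList, idList ) )
--
-- # keyword accepted in removedCuts -> name of the cut it disables
-- CUT_NAME_OF_KEYWORD = {
--     "pt":             "MinPtCut",
--     "sieie":          "GsfEleFull5x5SigmaIEtaIEtaCut",
--     "hoe":            "GsfEleHadronicOverEMEnergyScaledCut",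
--     "pfRelIso03_all": "GsfEleRelPFIsoScaledCut",
--     "SCEta":          "GsfEleSCEtaMultiRangeCut",
--     "dEtaSeed":       "GsfEleDEtaInSeedCut",
--     "dPhiInCut":      "GsfEleDPhiInCut",
--     "EinvMinusPinv":  "GsfEleEInverseMinusPInverseCut",
--     "convVeto":       "GsfEleConversionVetoCut",
--     "lostHits":       "GsfEleMissingHitsCut",
-- }
--
-- def electronVIDSelector( l, idVal, removedCuts=[] ):
--     skip = { CUT_NAME_OF_KEYWORD[k] for k in removedCuts if k in CUT_NAME_OF_KEYWORD }
--     return all( cut >= idVal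
--                 for name, cut in vidNestedWPBitMapToDict( l['vidNestedWPBitmap'] ).items()
--                 if name not in skip )
-- ===== Notes on version B (the rewrite author's own statement) =====
-- stated objective: simpler
-- what changed: Replaces the early-return for empty removedCuts and the ten if/removekey branches by a keyword-to-cut-name mapping, a skip set built from removedCuts, and a single filtered pass over the vidDict items.
import Mathlib
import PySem

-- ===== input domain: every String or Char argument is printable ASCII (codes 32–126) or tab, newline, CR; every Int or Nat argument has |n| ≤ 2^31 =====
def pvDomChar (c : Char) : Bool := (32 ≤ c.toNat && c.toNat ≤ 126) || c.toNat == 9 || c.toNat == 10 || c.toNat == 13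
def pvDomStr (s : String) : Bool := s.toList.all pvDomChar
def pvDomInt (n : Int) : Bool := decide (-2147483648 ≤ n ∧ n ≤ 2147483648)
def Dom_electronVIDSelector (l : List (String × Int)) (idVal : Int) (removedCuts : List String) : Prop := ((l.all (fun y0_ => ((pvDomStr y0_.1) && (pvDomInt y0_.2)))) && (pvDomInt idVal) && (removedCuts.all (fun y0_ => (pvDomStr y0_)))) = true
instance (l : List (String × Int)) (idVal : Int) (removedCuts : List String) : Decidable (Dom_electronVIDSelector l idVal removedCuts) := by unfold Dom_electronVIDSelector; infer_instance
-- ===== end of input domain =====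

-- B replaces the early-return plus ten if/removekey branches by one keyword→cut-name map,
-- a skip set and a single filtered pass over the items (objective: simpler; same cost).

-- ===== PORT A =====
def vidNestedWPBitMapNamingList : List String :=
  ["GsfEleMissingHitsCut",
   "GsfEleConversionVetoCut",
   "GsfEleRelPFIsoScaledCut",
   "GsfEleEInverseMinusPInverseCut",
   "GsfEleHadronicOverEMEnergyScaledCut",
   "GsfEleFull5x5SigmaIEtaIEtaCut",
   "GsfEleDPhiInCut",
   "GsfEleDEtaInSeedCut",
   "GsfEleSCEtaMultiRangeCut",
   "MinPtCut"]

-- "{0:030b}".format(val): PySem.Int.toBinChars = format(val,'b'); '030' zero-pads to width 30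
-- AFTER the sign, exactly as Python's numeric zero-padding does.
def pyFormat030b (val : Int) : List Char :=
  let s := PySem.Int.toBinChars val
  if 30 ≤ s.length then s
  else
    match s with
    | '-' :: rest => '-' :: (List.replicate (29 - rest.length) '0' ++ rest)
    | other => List.replicate (30 - other.length) '0' ++ other

-- textwrap.wrap(s, 3) on a string of '-'/binary digits (no spaces): chunks of 3 in order
-- (exact here: no whitespace and no inner hyphen, so wrap only breaks long "words").
def wrap3 (cs : List Char) : List (List Char) :=
  if h : cs = [] then [] else cs.take 3 :: wrap3 (cs.drop 3)
termination_by cs.length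
decreasing_by
  have := List.length_pos_of_ne_nil h
  simp
  omega

def vidNestedWPBitMapToDict (val : Int) : PySem.Dict String Int :=
  -- int(x, 2) → PySem.Int.ofCharsBase?; every chunk is a valid base-2 literal (nonempty,
  -- '-'/digits with the sign first), so int() never raises and the getD 0 default is never taken.
  let idList := (wrap3 (pyFormat030b val)).map (fun x => (PySem.Int.ofCharsBase? x 2).getD 0)
  PySem.Dict.ofList (vidNestedWPBitMapNamingList.zip idList)

-- removekey: dict copy + del; the deleted key always exists where A calls it (the vidDict
-- always carries all ten names), so del never raises and Dict.erase is exact.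
def removekey (d : PySem.Dict String Int) (key : String) : PySem.Dict String Int :=
  d.erase key

def electronVIDSelector (l : List (String × Int)) (idVal : Int) (removedCuts : List String) : Bool :=
  match (PySem.Dict.mk l).get? "vidNestedWPBitmap" with
  | none => false  -- Python raises KeyError here; excluded by Pre_
  | some w =>
    let vidDict := vidNestedWPBitMapToDict w
    if removedCuts.isEmpty then
      ((vidDict.values.map (fun cut => decide (idVal ≤ cut))).all id)
    else
      let d1 := if removedCuts.contains "pt" then removekey vidDict "MinPtCut" else vidDict
      let d2 := if removedCuts.contains "sieie" then removekey d1 "GsfEleFull5x5SigmaIEtaIEtaCut" else d1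
      let d3 := if removedCuts.contains "hoe" then removekey d2 "GsfEleHadronicOverEMEnergyScaledCut" else d2
      let d4 := if removedCuts.contains "pfRelIso03_all" then removekey d3 "GsfEleRelPFIsoScaledCut" else d3
      let d5 := if removedCuts.contains "SCEta" then removekey d4 "GsfEleSCEtaMultiRangeCut" else d4
      let d6 := if removedCuts.contains "dEtaSeed" then removekey d5 "GsfEleDEtaInSeedCut" else d5
      let d7 := if removedCuts.contains "dPhiInCut" then removekey d6 "GsfEleDPhiInCut" else d6
      let d8 := if removedCuts.contains "EinvMinusPinv" then removekey d7 "GsfEleEInverseMinusPInverseCut" else d7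
      let d9 := if removedCuts.contains "convVeto" then removekey d8 "GsfEleConversionVetoCut" else d8
      let d10 := if removedCuts.contains "lostHits" then removekey d9 "GsfEleMissingHitsCut" else d9
      ((d10.values.map (fun cut => decide (idVal ≤ cut))).all id)

-- ===== PORT B =====
def cutNameOfKeyword : PySem.Dict String String := PySem.Dict.mk
  [("pt", "MinPtCut"),
   ("sieie", "GsfEleFull5x5SigmaIEtaIEtaCut"),
   ("hoe", "GsfEleHadronicOverEMEnergyScaledCut"),
   ("pfRelIso03_all", "GsfEleRelPFIsoScaledCut"),
   ("SCEta", "GsfEleSCEtaMultiRangeCut"),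
   ("dEtaSeed", "GsfEleDEtaInSeedCut"),
   ("dPhiInCut", "GsfEleDPhiInCut"),
   ("EinvMinusPinv", "GsfEleEInverseMinusPInverseCut"),
   ("convVeto", "GsfEleConversionVetoCut"),
   ("lostHits", "GsfEleMissingHitsCut")]

def electronVIDSelector_alt (l : List (String × Int)) (idVal : Int) (removedCuts : List String) : Bool :=
  match (PySem.Dict.mk l).get? "vidNestedWPBitmap" with
  | none => false  -- Python raises KeyError here; excluded by Pre_
  | some w =>
    let skip : PySem.Set String :=
      PySem.Set.ofList (removedCuts.filterMap (fun k => cutNameOfKeyword.get? k))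
    (((vidNestedWPBitMapToDict w).items.filter (fun p => !(PySem.Set.contains skip p.1))).all
      (fun p => decide (idVal ≤ p.2)))

-- ===== PRECONDITION & SPEC =====
-- Pre_ excludes exactly the inputs where A raises: l without a "vidNestedWPBitmap" key (KeyError).
def Pre_electronVIDSelector (l : List (String × Int)) (idVal : Int) (removedCuts : List String) : Prop :=
  ((PySem.Dict.mk l).get? "vidNestedWPBitmap").isSome = true
instance (l : List (String × Int)) (idVal : Int) (removedCuts : List String) : Decidable (Pre_electronVIDSelector l idVal removedCuts) := by unfold Pre_electronVIDSelector; infer_instance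

def pvWitness_electronVIDSelector : (List (String × Int)) × Int × List String :=
  ([("vidNestedWPBitmap", 611099940)], 3, ["pt", "sieie"])

def Spec_electronVIDSelector (l : List (String × Int)) (idVal : Int) (removedCuts : List String) (out : Bool) : Prop := out = electronVIDSelector_alt l idVal removedCuts
instance (l : List (String × Int)) (idVal : Int) (removedCuts : List String) (out : Bool) : Decidable (Spec_electronVIDSelector l idVal removedCuts out) := by unfold Spec_electronVIDSelector; infer_instance

-- ===== CLAIM (what is proved, stated in full; the proofs are below) =====
def Claim_equal_electronVIDSelector : Prop := ∀ (l : List (String × Int)) (idVal : Int) (removedCuts : List String), Dom_electronVIDSelector l idVal removedCuts → Pre_electronVIDSelector l idVal removedCuts → Spec_electronVIDSelector l idVal removedCuts (electronVIDSelector l idVal removedCuts)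

-- ===== LEMMAS AND PROOFS =====

-- A's ten if/removekey lines, as the fold they definitionally are
def specsA : List (String × String) :=
  [("pt", "MinPtCut"),
   ("sieie", "GsfEleFull5x5SigmaIEtaIEtaCut"),
   ("hoe", "GsfEleHadronicOverEMEnergyScaledCut"),
   ("pfRelIso03_all", "GsfEleRelPFIsoScaledCut"),
   ("SCEta", "GsfEleSCEtaMultiRangeCut"),
   ("dEtaSeed", "GsfEleDEtaInSeedCut"),
   ("dPhiInCut", "GsfEleDPhiInCut"),
   ("EinvMinusPinv", "GsfEleEInverseMinusPInverseCut"),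
   ("convVeto", "GsfEleConversionVetoCut"),
   ("lostHits", "GsfEleMissingHitsCut")]

def bodyA (idVal : Int) (rc : List String) (d0 : PySem.Dict String Int) : Bool :=
  if rc.isEmpty then ((d0.values.map (fun cut => decide (idVal ≤ cut))).all id)
  else
    (((specsA.foldl (fun d q => if rc.contains q.1 then removekey d q.2 else d) d0).values.map
        (fun cut => decide (idVal ≤ cut))).all id)

def skipOf (rc : List String) : PySem.Set String :=
  PySem.Set.ofList (rc.filterMap (fun k => cutNameOfKeyword.get? k))

def bodyB (idVal : Int) (rc : List String) (d0 : PySem.Dict String Int) : Bool :=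
  ((d0.items.filter (fun p => !(PySem.Set.contains (skipOf rc) p.1))).all (fun p => decide (idVal ≤ p.2)))

lemma portA_eq (l : List (String × Int)) (idVal : Int) (rc : List String) (w : Int)
    (hres : (PySem.Dict.mk l).get? "vidNestedWPBitmap" = some w) :
    electronVIDSelector l idVal rc = bodyA idVal rc (vidNestedWPBitMapToDict w) := by
  unfold electronVIDSelector
  rw [hres]
  rfl

lemma portB_eq (l : List (String × Int)) (idVal : Int) (rc : List String) (w : Int)
    (hres : (PySem.Dict.mk l).get? "vidNestedWPBitmap" = some w) :
    electronVIDSelector_alt l idVal rc = bodyB idVal rc (vidNestedWPBitMapToDict w) := by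
  unfold electronVIDSelector_alt
  rw [hres]
  rfl

lemma wrap3_len : ∀ cs : List Char, cs.length ≤ 3 * (wrap3 cs).length := by
  intro cs
  induction cs using wrap3.induct with
  | case1 => simp [wrap3]
  | case2 cs h ih =>
    rw [wrap3, dif_neg h]
    simp only [List.length_cons, List.length_drop] at *
    omega

lemma length_pyFormat030b (w : Int) : 30 ≤ (pyFormat030b w).length := by
  unfold pyFormat030b
  set s := PySem.Int.toBinChars w with hs
  clear_value s
  by_cases h : 30 ≤ s.length
  · simp [h]
  · rw [if_neg h]
    split <;> simp at h ⊢ <;> omega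

lemma items_ofList_fresh {ν : Type} (L : List (String × ν)) (hnd : (L.map Prod.fst).Nodup) :
    (PySem.Dict.ofList L).items = L := by
  show (List.foldl (fun acc p => acc.insert p.1 p.2) PySem.Dict.empty L).items = L
  have := PySem.Dict.items_foldl_insert_fresh (l := L) (k := Prod.fst) (v := Prod.snd)
    (d := PySem.Dict.empty) (by intro a _; rfl) hnd
  simpa using this

lemma items_chain (rc : List String) : ∀ (specs : List (String × String)) (d : PySem.Dict String Int),
    (specs.foldl (fun d q => if rc.contains q.1 then removekey d q.2 else d) d).items
      = d.items.filter (fun p => specs.all (fun q => !(rc.contains q.1 && p.1 == q.2))) := by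
  intro specs
  induction specs with
  | nil => intro d; simp
  | cons q specs ih =>
    intro d
    rw [List.foldl_cons, ih]
    by_cases hc : rc.contains q.1 = true
    · simp only [hc, if_pos, removekey, PySem.Dict.erase, List.filter_filter, List.all_cons,
        Bool.true_and]
      apply List.filter_congr
      intro p _
      cases hpq : (p.1 == q.2) <;> simp
    · simp only [hc, Bool.false_and, List.all_cons, Bool.not_false, Bool.true_and]
      simp

lemma skip_contains_eq (rc : List String) (kw nm : String)
    (h : ∀ k : String, cutNameOfKeyword.get? k = some nm ↔ k = kw) :
    (skipOf rc).contains nm = rc.contains kw := by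
  rw [Bool.eq_iff_iff, PySem.Set.contains_iff]
  unfold skipOf
  rw [PySem.Set.mem_ofList, List.contains_iff_mem]
  simp only [List.mem_filterMap]
  constructor
  · rintro ⟨k, hk, hfk⟩; exact (h k).1 hfk ▸ hk
  · intro hk; exact ⟨kw, hk, (h kw).2 rfl⟩

lemma keyword_pt : ∀ k : String, cutNameOfKeyword.get? k = some "MinPtCut" ↔ k = "pt" := by
  intro k
  simp only [cutNameOfKeyword, PySem.Dict.get?_mk_cons]
  split_ifs with h1 h2 h3 h4 h5 h6 h7 h8 h9 h10
  all_goals try (rw [beq_iff_eq] at h1; subst h1; simp)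
  all_goals try (rw [beq_iff_eq] at h2; subst h2; simp)
  all_goals try (rw [beq_iff_eq] at h3; subst h3; simp)
  all_goals try (rw [beq_iff_eq] at h4; subst h4; simp)
  all_goals try (rw [beq_iff_eq] at h5; subst h5; simp)
  all_goals try (rw [beq_iff_eq] at h6; subst h6; simp)
  all_goals try (rw [beq_iff_eq] at h7; subst h7; simp)
  all_goals try (rw [beq_iff_eq] at h8; subst h8; simp)
  all_goals try (rw [beq_iff_eq] at h9; subst h9; simp)
  all_goals try (rw [beq_iff_eq] at h10; subst h10; simp)
  rw [show (PySem.Dict.mk ([] : List (String × String))).get? k = none from rfl]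
  constructor
  · intro hx; simp at hx
  · intro hx; subst hx; exact absurd (by decide) h1

lemma keyword_sieie : ∀ k : String, cutNameOfKeyword.get? k = some "GsfEleFull5x5SigmaIEtaIEtaCut" ↔ k = "sieie" := by
  intro k
  simp only [cutNameOfKeyword, PySem.Dict.get?_mk_cons]
  split_ifs with h1 h2 h3 h4 h5 h6 h7 h8 h9 h10
  all_goals try (rw [beq_iff_eq] at h1; subst h1; simp)
  all_goals try (rw [beq_iff_eq] at h2; subst h2; simp)
  all_goals try (rw [beq_iff_eq] at h3; subst h3; simp)
  all_goals try (rw [beq_iff_eq] at h4; subst h4; simp)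
  all_goals try (rw [beq_iff_eq] at h5; subst h5; simp)
  all_goals try (rw [beq_iff_eq] at h6; subst h6; simp)
  all_goals try (rw [beq_iff_eq] at h7; subst h7; simp)
  all_goals try (rw [beq_iff_eq] at h8; subst h8; simp)
  all_goals try (rw [beq_iff_eq] at h9; subst h9; simp)
  all_goals try (rw [beq_iff_eq] at h10; subst h10; simp)
  rw [show (PySem.Dict.mk ([] : List (String × String))).get? k = none from rfl]
  constructor
  · intro hx; simp at hx
  · intro hx; subst hx; exact absurd (by decide) h2

lemma keyword_hoe : ∀ k : String, cutNameOfKeyword.get? k = some "GsfEleHadronicOverEMEnergyScaledCut" ↔ k = "hoe" := by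
  intro k
  simp only [cutNameOfKeyword, PySem.Dict.get?_mk_cons]
  split_ifs with h1 h2 h3 h4 h5 h6 h7 h8 h9 h10
  all_goals try (rw [beq_iff_eq] at h1; subst h1; simp)
  all_goals try (rw [beq_iff_eq] at h2; subst h2; simp)
  all_goals try (rw [beq_iff_eq] at h3; subst h3; simp)
  all_goals try (rw [beq_iff_eq] at h4; subst h4; simp)
  all_goals try (rw [beq_iff_eq] at h5; subst h5; simp)
  all_goals try (rw [beq_iff_eq] at h6; subst h6; simp)
  all_goals try (rw [beq_iff_eq] at h7; subst h7; simp)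
  all_goals try (rw [beq_iff_eq] at h8; subst h8; simp)
  all_goals try (rw [beq_iff_eq] at h9; subst h9; simp)
  all_goals try (rw [beq_iff_eq] at h10; subst h10; simp)
  rw [show (PySem.Dict.mk ([] : List (String × String))).get? k = none from rfl]
  constructor
  · intro hx; simp at hx
  · intro hx; subst hx; exact absurd (by decide) h3

lemma keyword_pfRelIso03all : ∀ k : String, cutNameOfKeyword.get? k = some "GsfEleRelPFIsoScaledCut" ↔ k = "pfRelIso03_all" := by
  intro k
  simp only [cutNameOfKeyword, PySem.Dict.get?_mk_cons]
  split_ifs with h1 h2 h3 h4 h5 h6 h7 h8 h9 h10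
  all_goals try (rw [beq_iff_eq] at h1; subst h1; simp)
  all_goals try (rw [beq_iff_eq] at h2; subst h2; simp)
  all_goals try (rw [beq_iff_eq] at h3; subst h3; simp)
  all_goals try (rw [beq_iff_eq] at h4; subst h4; simp)
  all_goals try (rw [beq_iff_eq] at h5; subst h5; simp)
  all_goals try (rw [beq_iff_eq] at h6; subst h6; simp)
  all_goals try (rw [beq_iff_eq] at h7; subst h7; simp)
  all_goals try (rw [beq_iff_eq] at h8; subst h8; simp)
  all_goals try (rw [beq_iff_eq] at h9; subst h9; simp)
  all_goals try (rw [beq_iff_eq] at h10; subst h10; simp)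
  rw [show (PySem.Dict.mk ([] : List (String × String))).get? k = none from rfl]
  constructor
  · intro hx; simp at hx
  · intro hx; subst hx; exact absurd (by decide) h4

lemma keyword_SCEta : ∀ k : String, cutNameOfKeyword.get? k = some "GsfEleSCEtaMultiRangeCut" ↔ k = "SCEta" := by
  intro k
  simp only [cutNameOfKeyword, PySem.Dict.get?_mk_cons]
  split_ifs with h1 h2 h3 h4 h5 h6 h7 h8 h9 h10
  all_goals try (rw [beq_iff_eq] at h1; subst h1; simp)
  all_goals try (rw [beq_iff_eq] at h2; subst h2; simp)
  all_goals try (rw [beq_iff_eq] at h3; subst h3; simp)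
  all_goals try (rw [beq_iff_eq] at h4; subst h4; simp)
  all_goals try (rw [beq_iff_eq] at h5; subst h5; simp)
  all_goals try (rw [beq_iff_eq] at h6; subst h6; simp)
  all_goals try (rw [beq_iff_eq] at h7; subst h7; simp)
  all_goals try (rw [beq_iff_eq] at h8; subst h8; simp)
  all_goals try (rw [beq_iff_eq] at h9; subst h9; simp)
  all_goals try (rw [beq_iff_eq] at h10; subst h10; simp)
  rw [show (PySem.Dict.mk ([] : List (String × String))).get? k = none from rfl]
  constructor
  · intro hx; simp at hx
  · intro hx; subst hx; exact absurd (by decide) h5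

lemma keyword_dEtaSeed : ∀ k : String, cutNameOfKeyword.get? k = some "GsfEleDEtaInSeedCut" ↔ k = "dEtaSeed" := by
  intro k
  simp only [cutNameOfKeyword, PySem.Dict.get?_mk_cons]
  split_ifs with h1 h2 h3 h4 h5 h6 h7 h8 h9 h10
  all_goals try (rw [beq_iff_eq] at h1; subst h1; simp)
  all_goals try (rw [beq_iff_eq] at h2; subst h2; simp)
  all_goals try (rw [beq_iff_eq] at h3; subst h3; simp)
  all_goals try (rw [beq_iff_eq] at h4; subst h4; simp)
  all_goals try (rw [beq_iff_eq] at h5; subst h5; simp)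
  all_goals try (rw [beq_iff_eq] at h6; subst h6; simp)
  all_goals try (rw [beq_iff_eq] at h7; subst h7; simp)
  all_goals try (rw [beq_iff_eq] at h8; subst h8; simp)
  all_goals try (rw [beq_iff_eq] at h9; subst h9; simp)
  all_goals try (rw [beq_iff_eq] at h10; subst h10; simp)
  rw [show (PySem.Dict.mk ([] : List (String × String))).get? k = none from rfl]
  constructor
  · intro hx; simp at hx
  · intro hx; subst hx; exact absurd (by decide) h6

lemma keyword_dPhiInCut : ∀ k : String, cutNameOfKeyword.get? k = some "GsfEleDPhiInCut" ↔ k = "dPhiInCut" := by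
  intro k
  simp only [cutNameOfKeyword, PySem.Dict.get?_mk_cons]
  split_ifs with h1 h2 h3 h4 h5 h6 h7 h8 h9 h10
  all_goals try (rw [beq_iff_eq] at h1; subst h1; simp)
  all_goals try (rw [beq_iff_eq] at h2; subst h2; simp)
  all_goals try (rw [beq_iff_eq] at h3; subst h3; simp)
  all_goals try (rw [beq_iff_eq] at h4; subst h4; simp)
  all_goals try (rw [beq_iff_eq] at h5; subst h5; simp)
  all_goals try (rw [beq_iff_eq] at h6; subst h6; simp)
  all_goals try (rw [beq_iff_eq] at h7; subst h7; simp)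
  all_goals try (rw [beq_iff_eq] at h8; subst h8; simp)
  all_goals try (rw [beq_iff_eq] at h9; subst h9; simp)
  all_goals try (rw [beq_iff_eq] at h10; subst h10; simp)
  rw [show (PySem.Dict.mk ([] : List (String × String))).get? k = none from rfl]
  constructor
  · intro hx; simp at hx
  · intro hx; subst hx; exact absurd (by decide) h7

lemma keyword_EinvMinusPinv : ∀ k : String, cutNameOfKeyword.get? k = some "GsfEleEInverseMinusPInverseCut" ↔ k = "EinvMinusPinv" := by
  intro k
  simp only [cutNameOfKeyword, PySem.Dict.get?_mk_cons]
  split_ifs with h1 h2 h3 h4 h5 h6 h7 h8 h9 h10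
  all_goals try (rw [beq_iff_eq] at h1; subst h1; simp)
  all_goals try (rw [beq_iff_eq] at h2; subst h2; simp)
  all_goals try (rw [beq_iff_eq] at h3; subst h3; simp)
  all_goals try (rw [beq_iff_eq] at h4; subst h4; simp)
  all_goals try (rw [beq_iff_eq] at h5; subst h5; simp)
  all_goals try (rw [beq_iff_eq] at h6; subst h6; simp)
  all_goals try (rw [beq_iff_eq] at h7; subst h7; simp)
  all_goals try (rw [beq_iff_eq] at h8; subst h8; simp)
  all_goals try (rw [beq_iff_eq] at h9; subst h9; simp)
  all_goals try (rw [beq_iff_eq] at h10; subst h10; simp)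
  rw [show (PySem.Dict.mk ([] : List (String × String))).get? k = none from rfl]
  constructor
  · intro hx; simp at hx
  · intro hx; subst hx; exact absurd (by decide) h8

lemma keyword_convVeto : ∀ k : String, cutNameOfKeyword.get? k = some "GsfEleConversionVetoCut" ↔ k = "convVeto" := by
  intro k
  simp only [cutNameOfKeyword, PySem.Dict.get?_mk_cons]
  split_ifs with h1 h2 h3 h4 h5 h6 h7 h8 h9 h10
  all_goals try (rw [beq_iff_eq] at h1; subst h1; simp)
  all_goals try (rw [beq_iff_eq] at h2; subst h2; simp)
  all_goals try (rw [beq_iff_eq] at h3; subst h3; simp)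
  all_goals try (rw [beq_iff_eq] at h4; subst h4; simp)
  all_goals try (rw [beq_iff_eq] at h5; subst h5; simp)
  all_goals try (rw [beq_iff_eq] at h6; subst h6; simp)
  all_goals try (rw [beq_iff_eq] at h7; subst h7; simp)
  all_goals try (rw [beq_iff_eq] at h8; subst h8; simp)
  all_goals try (rw [beq_iff_eq] at h9; subst h9; simp)
  all_goals try (rw [beq_iff_eq] at h10; subst h10; simp)
  rw [show (PySem.Dict.mk ([] : List (String × String))).get? k = none from rfl]
  constructor
  · intro hx; simp at hx
  · intro hx; subst hx; exact absurd (by decide) h9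

lemma keyword_lostHits : ∀ k : String, cutNameOfKeyword.get? k = some "GsfEleMissingHitsCut" ↔ k = "lostHits" := by
  intro k
  simp only [cutNameOfKeyword, PySem.Dict.get?_mk_cons]
  split_ifs with h1 h2 h3 h4 h5 h6 h7 h8 h9 h10
  all_goals try (rw [beq_iff_eq] at h1; subst h1; simp)
  all_goals try (rw [beq_iff_eq] at h2; subst h2; simp)
  all_goals try (rw [beq_iff_eq] at h3; subst h3; simp)
  all_goals try (rw [beq_iff_eq] at h4; subst h4; simp)
  all_goals try (rw [beq_iff_eq] at h5; subst h5; simp)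
  all_goals try (rw [beq_iff_eq] at h6; subst h6; simp)
  all_goals try (rw [beq_iff_eq] at h7; subst h7; simp)
  all_goals try (rw [beq_iff_eq] at h8; subst h8; simp)
  all_goals try (rw [beq_iff_eq] at h9; subst h9; simp)
  all_goals try (rw [beq_iff_eq] at h10; subst h10; simp)
  rw [show (PySem.Dict.mk ([] : List (String × String))).get? k = none from rfl]
  constructor
  · intro hx; simp at hx
  · intro hx; subst hx; exact absurd (by decide) h10


lemma core (idVal : Int) (rc : List String) (ts : List Int) (h : 10 ≤ ts.length) :
    bodyA idVal rc (PySem.Dict.ofList (vidNestedWPBitMapNamingList.zip ts))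
      = bodyB idVal rc (PySem.Dict.ofList (vidNestedWPBitMapNamingList.zip ts)) := by
  rcases ts with _ | ⟨t0, _ | ⟨t1, _ | ⟨t2, _ | ⟨t3, _ | ⟨t4, _ | ⟨t5, _ | ⟨t6, _ | ⟨t7, _ | ⟨t8, _ | ⟨t9, rest⟩⟩⟩⟩⟩⟩⟩⟩⟩⟩ <;> simp at h
  have hz : vidNestedWPBitMapNamingList.zip (t0::t1::t2::t3::t4::t5::t6::t7::t8::t9::rest)
      = [("GsfEleMissingHitsCut", t0), ("GsfEleConversionVetoCut", t1), ("GsfEleRelPFIsoScaledCut", t2), ("GsfEleEInverseMinusPInverseCut", t3), ("GsfEleHadronicOverEMEnergyScaledCut", t4), ("GsfEleFull5x5SigmaIEtaIEtaCut", t5), ("GsfEleDPhiInCut", t6), ("GsfEleDEtaInSeedCut", t7), ("GsfEleSCEtaMultiRangeCut", t8), ("MinPtCut", t9)] := rfl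
  rw [hz]
  have hit : (PySem.Dict.ofList [("GsfEleMissingHitsCut", t0), ("GsfEleConversionVetoCut", t1), ("GsfEleRelPFIsoScaledCut", t2), ("GsfEleEInverseMinusPInverseCut", t3), ("GsfEleHadronicOverEMEnergyScaledCut", t4), ("GsfEleFull5x5SigmaIEtaIEtaCut", t5), ("GsfEleDPhiInCut", t6), ("GsfEleDEtaInSeedCut", t7), ("GsfEleSCEtaMultiRangeCut", t8), ("MinPtCut", t9)]).items
      = [("GsfEleMissingHitsCut", t0), ("GsfEleConversionVetoCut", t1), ("GsfEleRelPFIsoScaledCut", t2), ("GsfEleEInverseMinusPInverseCut", t3), ("GsfEleHadronicOverEMEnergyScaledCut", t4), ("GsfEleFull5x5SigmaIEtaIEtaCut", t5), ("GsfEleDPhiInCut", t6), ("GsfEleDEtaInSeedCut", t7), ("GsfEleSCEtaMultiRangeCut", t8), ("MinPtCut", t9)] := by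
    apply items_ofList_fresh
    simp
  by_cases hrc : rc.isEmpty
  · have hnil : rc = [] := List.isEmpty_iff.mp hrc
    subst hnil
    simp [bodyA, bodyB, skipOf, PySem.Dict.values, hit]
  · have hrc' : rc.isEmpty = false := by simpa using hrc
    simp only [bodyA, bodyB, hrc', Bool.false_eq_true, if_false]
    simp only [PySem.Dict.values]
    rw [items_chain, hit]
    simp only [List.all_map, List.all_filter, Function.comp, List.all_cons, List.all_nil]
    rw [skip_contains_eq rc "lostHits" "GsfEleMissingHitsCut" keyword_lostHits, skip_contains_eq rc "convVeto" "GsfEleConversionVetoCut" keyword_convVeto, skip_contains_eq rc "pfRelIso03_all" "GsfEleRelPFIsoScaledCut" keyword_pfRelIso03all, skip_contains_eq rc "EinvMinusPinv" "GsfEleEInverseMinusPInverseCut" keyword_EinvMinusPinv, skip_contains_eq rc "hoe" "GsfEleHadronicOverEMEnergyScaledCut" keyword_hoe, skip_contains_eq rc "sieie" "GsfEleFull5x5SigmaIEtaIEtaCut" keyword_sieie, skip_contains_eq rc "dPhiInCut" "GsfEleDPhiInCut" keyword_dPhiInCut, skip_contains_eq rc "dEtaSeed" "GsfEleDEtaInSeedCut"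 keyword_dEtaSeed, skip_contains_eq rc "SCEta" "GsfEleSCEtaMultiRangeCut" keyword_SCEta, skip_contains_eq rc "pt" "MinPtCut" keyword_pt]
    simp [specsA]

-- ===== VERDICT (by name: the statement is the Claim_ definition above) =====
theorem electronVIDSelector_spec : Claim_equal_electronVIDSelector := by
  intro l idVal rc _ hpre
  unfold Spec_electronVIDSelector
  cases hres : (PySem.Dict.mk l).get? "vidNestedWPBitmap" with
  | none => unfold Pre_electronVIDSelector at hpre; rw [hres] at hpre; simp at hpre
  | some w =>
    rw [portA_eq l idVal rc w hres, portB_eq l idVal rc w hres]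
    show bodyA idVal rc (PySem.Dict.ofList _) = bodyB idVal rc (PySem.Dict.ofList _)
    apply core
    have h1 := length_pyFormat030b w
    have h2 := wrap3_len (pyFormat030b w)
    simp only [List.length_map]
    omega
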